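-- pv_equiv track=rewrite | github.com/jk-jung/problem-solving | codewars/6kyu/6_Imaginary Base Conversion.py | convert
-- ===== SOURCE A (Python) =====
-- def convert(n):
--     r = [0, 0]
--     for i, x in enumerate(str(n)[::-1]):
--         if x == '1':
--             if i % 4 == 0: r[0] += 1
--             if i % 4 == 1: r[1] += 1
--             if i % 4 == 2: r[0] -= 1
--             if i % 4 == 3: r[1] -= 1
--
--     return r
-- ===== SOURCE B (Python) =====
-- def convert(n):
--     s = str(n)[::-1]
--     return [s[0::4].count('1') - s[2::4].count('1'),
--             s[1::4].count('1') - s[3::4].count('1')]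
-- ===== Notes on version B (the rewrite author's own statement) =====
-- stated objective: simpler
-- what changed: Replaces A's per-digit enumerate loop with modular-index branches and a mutated accumulator pair by a single string reversal plus strided slices (every fourth character, at each of the possible offsets) whose '1'-counts give the two result components directly.
import Mathlib
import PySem

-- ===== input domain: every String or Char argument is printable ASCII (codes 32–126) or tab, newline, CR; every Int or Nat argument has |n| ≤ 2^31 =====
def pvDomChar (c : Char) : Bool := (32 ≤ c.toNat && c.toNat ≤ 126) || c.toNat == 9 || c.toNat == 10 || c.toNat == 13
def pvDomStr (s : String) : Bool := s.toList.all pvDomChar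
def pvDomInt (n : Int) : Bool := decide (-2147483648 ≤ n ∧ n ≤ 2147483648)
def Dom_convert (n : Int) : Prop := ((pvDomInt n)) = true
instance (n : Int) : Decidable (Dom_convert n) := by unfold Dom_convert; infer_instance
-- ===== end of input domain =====

-- B replaces A's per-digit enumerate loop with four i%4 branches by four strided
-- slices of the (once-)reversed decimal string and '1'-counts on them (objective: simpler).

-- ===== PORT A =====
-- the loop body of A (sequential non-elif ifs, as in the source)
def stepA (r : Int × Int) (ix : Int × Char) : Int × Int :=
  if ix.2 = '1' then
    let r := if PySem.Int.mod ix.1 4 = 0 then (r.1 + 1, r.2) else r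
    let r := if PySem.Int.mod ix.1 4 = 1 then (r.1, r.2 + 1) else r
    let r := if PySem.Int.mod ix.1 4 = 2 then (r.1 - 1, r.2) else r
    let r := if PySem.Int.mod ix.1 4 = 3 then (r.1, r.2 - 1) else r
    r
  else r

-- str(n)[::-1] is the reverse of the decimal string (PySem.List.slice?_none_none_neg_one)
def convert (n : Int) : List Int :=
  let r := (PySem.List.enumerate ((PySem.Int.toChars n).reverse) 0).foldl stepA (0, 0)
  [r.1, r.2]

-- ===== PORT B =====
def convert_alt (n : Int) : List Int :=
  let s := (PySem.Int.toChars n).reverse      -- str(n)[::-1]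
  let c := fun (k : Int) => (((PySem.List.slice? s (some k) none 4).getD []).count '1' : Int)  -- s[k::4].count('1')
  [c 0 - c 2, c 1 - c 3]

-- ===== PRECONDITION & SPEC =====
def Spec_convert (n : Int) (out : List Int) : Prop := out = convert_alt n
instance (n : Int) (out : List Int) : Decidable (Spec_convert n out) := by unfold Spec_convert; infer_instance

-- ===== CLAIM (what is proved, stated in full; the proofs are below) =====
def Claim_equal_convert : Prop := ∀ (n : Int), Dom_convert n → Spec_convert n (convert n)

-- ===== LEMMAS AND PROOFS =====

-- proof-only: every 4th element of a list, starting at its head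
def pick : List Char → List Char
  | [] => []
  | x :: t => x :: pick (t.drop 3)
  termination_by s => s.length
  decreasing_by simp

lemma mod4_0 (i : Int) : PySem.Int.mod (4*i) 4 = 0 := by
  rw [PySem.Int.mod_eq_emod_of_pos (by norm_num)]; omega
lemma mod4_1 (i : Int) : PySem.Int.mod (4*i+1) 4 = 1 := by
  rw [PySem.Int.mod_eq_emod_of_pos (by norm_num)]; omega
lemma mod4_2 (i : Int) : PySem.Int.mod (4*i+1+1) 4 = 2 := by
  rw [PySem.Int.mod_eq_emod_of_pos (by norm_num)]; omega
lemma mod4_3 (i : Int) : PySem.Int.mod (4*i+1+1+1) 4 = 3 := by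
  rw [PySem.Int.mod_eq_emod_of_pos (by norm_num)]; omega

lemma stepA_mod0 (r : Int × Int) (j : Int) (x : Char) (h : PySem.Int.mod j 4 = 0) :
    stepA r (j, x) = if x = '1' then (r.1 + 1, r.2) else r := by
  simp only [stepA, h]; norm_num
lemma stepA_mod1 (r : Int × Int) (j : Int) (x : Char) (h : PySem.Int.mod j 4 = 1) :
    stepA r (j, x) = if x = '1' then (r.1, r.2 + 1) else r := by
  simp only [stepA, h]; norm_num
lemma stepA_mod2 (r : Int × Int) (j : Int) (x : Char) (h : PySem.Int.mod j 4 = 2) :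
    stepA r (j, x) = if x = '1' then (r.1 - 1, r.2) else r := by
  simp only [stepA, h]; norm_num
lemma stepA_mod3 (r : Int × Int) (j : Int) (x : Char) (h : PySem.Int.mod j 4 = 3) :
    stepA r (j, x) = if x = '1' then (r.1, r.2 - 1) else r := by
  simp only [stepA, h]; norm_num

lemma pickAux (fuel : Nat) : ∀ (s : List Char) (k : Int), 0 ≤ k → s.length ≤ k.toNat + 4*fuel →
    List.filterMap (fun j => s[(k + 4*(j:Nat)).toNat]?) (List.range (((s.length:Int) - k + 4 - 1)/4).toNat)
      = pick (s.drop k.toNat) := by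
  induction fuel with
  | zero =>
    intro s k hk hlen
    have hc : (((s.length:Int) - k + 4 - 1)/4).toNat = 0 := by omega
    rw [hc]
    simp [List.drop_eq_nil_of_le (by omega : s.length ≤ k.toNat), pick]
  | succ f ih =>
    intro s k hk hlen
    by_cases hlt : k.toNat < s.length
    · have hc : (((s.length:Int) - k + 4 - 1)/4).toNat = (((s.length:Int) - (k+4) + 4 - 1)/4).toNat + 1 := by
        omega
      rw [hc, List.range_succ_eq_map]
      rw [List.filterMap_cons, List.filterMap_map]
      have h0 : (k + 4*((0:Nat):Int)).toNat = k.toNat := by omega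
      have hfun : ((fun j => s[(k + 4*(j:Nat)).toNat]?) ∘ Nat.succ) = (fun j => s[((k+4) + 4*(j:Nat)).toNat]?) := by
        funext j
        simp only [Function.comp]
        congr 1
        omega
      rw [hfun, ih s (k+4) (by omega) (by omega)]
      rw [h0, List.getElem?_eq_getElem hlt]
      rw [List.drop_eq_getElem_cons hlt]
      have : pick (s[k.toNat] :: List.drop (k.toNat + 1) s) = s[k.toNat] :: pick ((List.drop (k.toNat+1) s).drop 3) := by
        rw [pick]
      rw [this, List.drop_drop]
      have h4 : k.toNat + 1 + 3 = (k+4).toNat := by omega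
      rw [h4]
    · have hc : (((s.length:Int) - k + 4 - 1)/4).toNat = 0 := by omega
      rw [hc]
      simp [List.drop_eq_nil_of_le (by omega : s.length ≤ k.toNat), pick]

lemma slice4 (s : List Char) (k : Int) (hk : 0 ≤ k) :
    PySem.List.slice? s (some k) none 4 = some (pick (s.drop k.toNat)) := by
  simp only [PySem.List.slice?, PySem.List.sliceIndices]
  simp only [if_neg (by norm_num : ¬ (4:Int) = 0), if_neg (by norm_num : ¬ (4:Int) < 0),
    if_neg (not_lt.mpr hk), if_pos (by norm_num : (0:Int) < 4)]
  by_cases hlt : k < (s.length : Int)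
  · rw [min_eq_left (le_of_lt hlt), if_pos hlt]
    rw [← pickAux s.length s k hk (by omega)]
  · rw [min_eq_right (not_lt.mp hlt), if_neg (lt_irrefl _)]
    rw [← pickAux s.length s k hk (by omega)]
    have hc : (((s.length:Int) - k + 4 - 1)/4).toNat = 0 := by omega
    rw [hc]
    simp

lemma loopA (fuel : Nat) : ∀ (s : List Char), s.length ≤ 4*fuel → ∀ (i : Nat) (a b : Int),
    (PySem.List.enumerate s (4*(i:Int))).foldl stepA (a, b) =
      (a + ((pick s).count '1' : Int) - ((pick (s.drop 2)).count '1' : Int),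
       b + ((pick (s.drop 1)).count '1' : Int) - ((pick (s.drop 3)).count '1' : Int)) := by
  induction fuel with
  | zero =>
    intro s hlen i a b
    have hs : s = [] := by cases s <;> simp_all
    subst hs
    simp [PySem.List.enumerate, pick]
  | succ f ih =>
    intro s hlen i a b
    match s with
    | [] => simp [PySem.List.enumerate, pick]
    | [x] =>
      simp only [PySem.List.enumerate, List.foldl_cons, List.foldl_nil]
      rw [stepA_mod0 _ _ _ (mod4_0 i)]
      by_cases hx : x = '1' <;> simp [hx, pick]
    | [x, y] =>
      simp only [PySem.List.enumerate, List.foldl_cons, List.foldl_nil]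
      rw [stepA_mod0 _ _ _ (mod4_0 i)]
      by_cases hx : x = '1' <;> by_cases hy : y = '1' <;>
        simp [hx, hy, pick, stepA_mod1 _ _ _ (mod4_1 i)]
    | [x, y, z] =>
      simp only [PySem.List.enumerate, List.foldl_cons, List.foldl_nil]
      rw [stepA_mod0 _ _ _ (mod4_0 i)]
      by_cases hx : x = '1' <;> by_cases hy : y = '1' <;> by_cases hz : z = '1' <;>
        simp [hx, hy, hz, pick, stepA_mod1 _ _ _ (mod4_1 i), stepA_mod2 _ _ _ (mod4_2 i)]
    | x :: y :: z :: w :: t =>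
      have harg : (4*(i:Int)+1+1+1+1) = 4*(((i+1:Nat)):Int) := by push_cast; ring
      simp only [PySem.List.enumerate, List.foldl_cons, harg]
      rw [stepA_mod0 _ _ _ (mod4_0 i)]
      have ht : t.length ≤ 4*f := by simp only [List.length_cons] at hlen; omega
      have iht := ih t ht (i+1)
      push_cast at iht
      by_cases hx : x = '1' <;> by_cases hy : y = '1' <;> by_cases hz : z = '1' <;> by_cases hw : w = '1' <;>
        simp only [hx, hy, hz, hw,
          stepA_mod1 _ _ _ (mod4_1 i), stepA_mod2 _ _ _ (mod4_2 i), stepA_mod3 _ _ _ (mod4_3 i)] <;>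
        simp [hx, hy, hz, hw, iht, pick] <;> omega

-- ===== VERDICT (by name: the statement is the Claim_ definition above) =====
theorem convert_spec : Claim_equal_convert := by
  intro n _
  unfold Spec_convert convert convert_alt
  have hl := loopA (PySem.Int.toChars n).reverse.length (PySem.Int.toChars n).reverse (by omega) 0 0 0
  simp only [Nat.cast_zero, mul_zero] at hl
  dsimp only
  rw [hl, slice4 _ 0 (by norm_num), slice4 _ 1 (by norm_num), slice4 _ 2 (by norm_num),
    slice4 _ 3 (by norm_num)]
  simp
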